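-- pv_equiv track=rewrite | github.com/philipaconrad/benchgen | benchgen.py | generate_bit_slice_indices
-- ===== SOURCE A (Python) =====
-- def compute_field_bit_width(idx_hi, idx_lo):
--     return (idx_hi+1) - idx_lo
--
-- def generate_bit_slice_indices(field_lengths_hex, exact_bit_width_tuples):
--     out = []
--     field_lengths_hexbits = [x * 4 for x in field_lengths_hex]
--     top = sum(field_lengths_hexbits)
--     for (hex_length, (idx_hi, idx_lo)) in zip(field_lengths_hexbits,
--                                               exact_bit_width_tuples):
--         width = compute_field_bit_width(idx_hi, idx_lo)
--         out_lo = (top - hex_length)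
--         out_hi = (out_lo + width) - 1
--         out.append((out_hi, out_lo))
--         top -= hex_length  # Skip to next field in the vector.
--     return out
-- ===== SOURCE B (Python) =====
-- def generate_bit_slice_indices(field_lengths_hex, exact_bit_width_tuples):
--     hexbits = [x * 4 for x in field_lengths_hex]
--     # Suffix-sum table: s[i] = sum(hexbits[i:]), s[n] = 0.
--     s = [0] * (len(hexbits) + 1)
--     for i in range(len(hexbits) - 1, -1, -1):
--         s[i] = s[i + 1] + hexbits[i]
--     # s[1:] lists the per-field lower offsets; zip truncates like A's loop.
--     return [(off + (idx_hi - idx_lo), off)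
--             for off, (idx_hi, idx_lo) in zip(s[1:], exact_bit_width_tuples)]
-- ===== Notes on version B (the rewrite author's own statement) =====
-- stated objective: alternative
-- what changed: Replaces the mutable running 'top' accumulator with a precomputed suffix-sum offset table and a single zip comprehension, folding the width arithmetic into off + (hi - lo).
import Mathlib
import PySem

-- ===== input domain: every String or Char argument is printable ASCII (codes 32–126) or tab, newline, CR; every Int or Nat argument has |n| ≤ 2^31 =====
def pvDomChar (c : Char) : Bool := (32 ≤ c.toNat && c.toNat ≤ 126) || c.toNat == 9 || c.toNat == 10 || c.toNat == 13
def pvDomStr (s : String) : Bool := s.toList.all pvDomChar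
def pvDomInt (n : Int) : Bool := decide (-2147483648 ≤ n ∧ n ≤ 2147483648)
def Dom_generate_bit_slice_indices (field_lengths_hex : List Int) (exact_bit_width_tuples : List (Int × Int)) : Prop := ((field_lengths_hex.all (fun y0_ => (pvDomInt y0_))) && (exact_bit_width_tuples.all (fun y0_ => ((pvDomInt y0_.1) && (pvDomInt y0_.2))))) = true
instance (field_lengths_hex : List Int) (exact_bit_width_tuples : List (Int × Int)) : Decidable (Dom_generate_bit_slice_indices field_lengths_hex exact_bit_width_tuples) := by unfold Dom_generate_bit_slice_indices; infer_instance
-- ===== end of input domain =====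

-- B replaces A's mutable running `top` accumulator with a precomputed suffix-sum
-- offset table zipped into one comprehension (alternative decomposition, same cost).


-- ===== PORT A =====
-- helper compute_field_bit_width
def compute_field_bit_width (idx_hi idx_lo : Int) : Int := (idx_hi + 1) - idx_lo

-- the for-loop over zip(hexbits, tuples) with running accumulator `top`
def genA_loop : Int → List (Int × (Int × Int)) → List (Int × Int)
  | _, [] => []
  | top, (hex_length, (idx_hi, idx_lo)) :: rest =>
      let width := compute_field_bit_width idx_hi idx_lo
      let out_lo := top - hex_length
      let out_hi := (out_lo + width) - 1
      (out_hi, out_lo) :: genA_loop (top - hex_length) rest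

def generate_bit_slice_indices (field_lengths_hex : List Int) (exact_bit_width_tuples : List (Int × Int)) : List (Int × Int) :=
  let field_lengths_hexbits := field_lengths_hex.map (fun x => x * 4)
  let top := field_lengths_hexbits.sum
  genA_loop top (field_lengths_hexbits.zip exact_bit_width_tuples)

-- ===== PORT B =====
-- suffix-sum table built back to front: result has s[i] = sum hexbits[i:], last entry 0
def suffixSums : List Int → List Int
  | [] => [0]
  | x :: xs =>
      let s := suffixSums xs
      (x + s.headD 0) :: s

def generate_bit_slice_indices_alt (field_lengths_hex : List Int) (exact_bit_width_tuples : List (Int × Int)) : List (Int × Int) :=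
  let hexbits := field_lengths_hex.map (fun x => x * 4)
  let s := suffixSums hexbits
  (s.tail.zip exact_bit_width_tuples).map
    (fun p => (p.1 + (p.2.1 - p.2.2), p.1))

-- ===== PRECONDITION & SPEC =====
def Spec_generate_bit_slice_indices (field_lengths_hex : List Int) (exact_bit_width_tuples : List (Int × Int)) (out : List (Int × Int)) : Prop := out = generate_bit_slice_indices_alt field_lengths_hex exact_bit_width_tuples
instance (field_lengths_hex : List Int) (exact_bit_width_tuples : List (Int × Int)) (out : List (Int × Int)) : Decidable (Spec_generate_bit_slice_indices field_lengths_hex exact_bit_width_tuples out) := by unfold Spec_generate_bit_slice_indices; infer_instance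

-- ===== CLAIM (what is proved, stated in full; the proofs are below) =====
def Claim_equal_generate_bit_slice_indices : Prop := ∀ (field_lengths_hex : List Int) (exact_bit_width_tuples : List (Int × Int)), Dom_generate_bit_slice_indices field_lengths_hex exact_bit_width_tuples → Spec_generate_bit_slice_indices field_lengths_hex exact_bit_width_tuples (generate_bit_slice_indices field_lengths_hex exact_bit_width_tuples)

-- ===== LEMMAS AND PROOFS =====
lemma suffixSums_headD (xs : List Int) : (suffixSums xs).headD 0 = xs.sum := by
  induction xs with
  | nil => rfl
  | cons x xs ih => simp only [suffixSums, List.headD_cons]; rw [ih]; simp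

lemma suffixSums_eq_cons (xs : List Int) :
    suffixSums xs = xs.sum :: (suffixSums xs).tail := by
  cases xs with
  | nil => rfl
  | cons x xs =>
    simp only [suffixSums, List.tail_cons, suffixSums_headD, List.sum_cons]

lemma genA_loop_eq (hb : List Int) (ts : List (Int × Int)) :
    genA_loop hb.sum (hb.zip ts)
      = ((suffixSums hb).tail.zip ts).map (fun p => (p.1 + (p.2.1 - p.2.2), p.1)) := by
  induction hb generalizing ts with
  | nil => simp [suffixSums, genA_loop]
  | cons x xs ih =>
    cases ts with
    | nil => simp [genA_loop, suffixSums]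
    | cons t ts =>
      obtain ⟨hi, lo⟩ := t
      have htail : (suffixSums (x :: xs)).tail = suffixSums xs := rfl
      rw [htail, suffixSums_eq_cons xs]
      simp only [List.zip_cons_cons, List.map_cons, genA_loop, List.sum_cons,
        compute_field_bit_width]
      rw [List.cons_eq_cons]
      constructor
      · simp only [Prod.mk.injEq]; constructor <;> ring
      · rw [show x + xs.sum - x = xs.sum from by ring]
        exact ih ts

-- ===== VERDICT (by name: the statement is the Claim_ definition above) =====
theorem generate_bit_slice_indices_spec : Claim_equal_generate_bit_slice_indices := by
  intro fl ts _
  unfold Spec_generate_bit_slice_indices generate_bit_slice_indices generate_bit_slice_indices_alt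
  exact genA_loop_eq (fl.map (fun x => x * 4)) ts
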